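-- pv_equiv track=rewrite | github.com/rapnob/stance_formation | src/toposneg.py | changed_only_once
-- ===== SOURCE A (Python) =====
-- def changed_only_once(l):
--     state=l[0]
--     c=0
--     cp=0
--     for i in range(1,len(l)):
--         if l[i]!=state:
--             c+=1
--             state=l[i]
--             cp=i
--     if c>1:
--         return -1
--     else:
--         return cp
-- ===== SOURCE B (Python) =====
-- def changed_only_once(l):
--     # Run-length encoding: split l into consecutive runs, then decide from the run count.
--     runs = []
--     prev = None
--     for x in l:
--         if runs and x == prev:
--             runs[-1] += 1
--         else:
--             runs.append(1)
--             prev = x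
--     if len(runs) > 2:
--         return -1
--     if len(runs) == 2:
--         return runs[0]
--     return 0
-- ===== Notes on version B (the rewrite author's own statement) =====
-- stated objective: idiomatic
-- what changed: B builds a run-length encoding of the list in one pass and answers from the number of runs (first run length = index of the single change), instead of A's index loop tracking a change counter, last state and last change position.
import Mathlib
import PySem

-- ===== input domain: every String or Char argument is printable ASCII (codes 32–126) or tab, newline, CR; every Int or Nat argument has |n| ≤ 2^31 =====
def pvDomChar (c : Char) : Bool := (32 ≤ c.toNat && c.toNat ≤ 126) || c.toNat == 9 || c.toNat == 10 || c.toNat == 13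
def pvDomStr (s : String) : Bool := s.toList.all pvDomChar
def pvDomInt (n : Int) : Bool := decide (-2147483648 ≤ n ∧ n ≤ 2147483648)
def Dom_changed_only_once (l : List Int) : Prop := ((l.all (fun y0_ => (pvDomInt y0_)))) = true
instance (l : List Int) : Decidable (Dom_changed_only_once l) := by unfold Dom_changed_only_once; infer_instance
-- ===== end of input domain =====

-- B replaces A's index loop (change counter + last state + last change position) by a one-pass
-- run-length encoding, answering from the number of runs; same cost, more idiomatic.


-- ===== PORT A =====
def changed_only_once (l : List Int) : Int :=
  let state : Int := l.headD 0      -- state = first element; Pre_ excludes the empty list, where Python raises IndexError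
  let r := (PySem.List.pyRange 1 (l.length : Int) 1).foldl
    (fun (acc : Int × Int × Int) (i : Int) =>
      if PySem.List.pyGetD l i 0 ≠ acc.1 then (PySem.List.pyGetD l i 0, acc.2.1 + 1, i)
      else acc) (state, 0, 0)
  if r.2.1 > 1 then -1 else r.2.2

-- ===== PORT B =====
def changed_only_once_alt (l : List Int) : Int :=
  let r := l.foldl
    (fun (acc : List Int × Option Int) (x : Int) =>
      if acc.1 ≠ [] ∧ acc.2 = some x then
        ((match acc.1 with | c :: t => (c + 1) :: t | [] => acc.1), acc.2)   -- runs[-1] += 1 (runs kept reversed)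
      else (1 :: acc.1, some x)) ([], none)
  let runs := r.1.reverse
  if (runs.length : Int) > 2 then -1
  else if runs.length = 2 then runs.headD 0
  else 0

-- ===== PRECONDITION & SPEC =====
-- Pre_ excludes exactly the empty list, on which A raises IndexError reading the first element.
def Pre_changed_only_once (l : List Int) : Prop := l ≠ []
instance (l : List Int) : Decidable (Pre_changed_only_once l) := by unfold Pre_changed_only_once; infer_instance
def pvWitness_changed_only_once : List Int := [1, 1, 2]

def Spec_changed_only_once (l : List Int) (out : Int) : Prop := out = changed_only_once_alt l
instance (l : List Int) (out : Int) : Decidable (Spec_changed_only_once l out) := by unfold Spec_changed_only_once; infer_instance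

-- ===== CLAIM (what is proved, stated in full; the proofs are below) =====
def Claim_equal_changed_only_once : Prop := ∀ (l : List Int), Dom_changed_only_once l → Pre_changed_only_once l → Spec_changed_only_once l (changed_only_once l)

-- ===== LEMMAS AND PROOFS =====

-- A's loop, rewritten as structural recursion over the tail, carrying the absolute index.
def auxA : List Int → Int → (Int × Int × Int) → (Int × Int × Int)
  | [], _, s => s
  | x :: xs, i, (st, c, cp) =>
      auxA xs (i + 1) (if x ≠ st then (x, c + 1, i) else (st, c, cp))

-- B's loop body as a named step function.
def stepB (acc : List Int × Option Int) (x : Int) : List Int × Option Int :=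
  if acc.1 ≠ [] ∧ acc.2 = some x then
    ((match acc.1 with | c :: t => (c + 1) :: t | [] => acc.1), acc.2)
  else (1 :: acc.1, some x)

lemma foldB_eq (l : List Int) (s : List Int × Option Int) :
    l.foldl (fun (acc : List Int × Option Int) (x : Int) =>
      if acc.1 ≠ [] ∧ acc.2 = some x then
        ((match acc.1 with | c :: t => (c + 1) :: t | [] => acc.1), acc.2)
      else (1 :: acc.1, some x)) s = l.foldl stepB s := by
  induction l generalizing s with
  | nil => rfl
  | cons x xs ih => simp [List.foldl, stepB, ih]

-- Bridge: A's fold over pyRange k..len equals auxA on l.drop k.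
lemma foldA_bridge (l : List Int) :
    ∀ (xs : List Int) (k : Nat) (s : Int × Int × Int), l.drop k = xs →
    (PySem.List.pyRange (k : Int) (l.length : Int) 1).foldl
      (fun (acc : Int × Int × Int) (i : Int) =>
        if PySem.List.pyGetD l i 0 ≠ acc.1 then (PySem.List.pyGetD l i 0, acc.2.1 + 1, i)
        else acc) s = auxA xs (k : Int) s := by
  intro xs
  induction xs with
  | nil =>
      intro k s h
      have hk : l.length ≤ k := by
        by_contra hlt
        push Not at hlt
        have := List.drop_eq_nil_iff.mp h
        omega
      rw [PySem.List.pyRange_one_eq_nil (by exact_mod_cast hk)]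
      rfl
  | cons x xs ih =>
      intro k s h
      have hk : k < l.length := by
        by_contra hle
        push Not at hle
        simp [List.drop_eq_nil_iff.mpr hle] at h
      have hx : l[k] = x := by
        have h' := congrArg (fun t => t.head?) h
        simp only [List.head?_drop, List.head?_cons] at h'
        rw [List.getElem?_eq_getElem hk] at h'
        exact Option.some.inj h'
      have hget : PySem.List.pyGetD l (k : Int) 0 = x := by
        rw [PySem.List.pyGetD_natCast]
        simp [List.getD, List.getElem?_eq_getElem hk, hx]
      have hdrop : l.drop (k + 1) = xs := by
        have h' := congrArg List.tail h
        rwa [List.tail_drop, List.tail_cons] at h'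
      rw [PySem.List.pyRange_one_cons (by exact_mod_cast hk)]
      obtain ⟨st, c, cp⟩ := s
      have := ih (k + 1) (if x ≠ st then (x, c + 1, (k : Int)) else (st, c, cp)) hdrop
      push_cast at this
      simp only [List.foldl, auxA, hget]
      exact this

-- The invariant tying A's (c, cp) to B's reversed run list rs at absolute index i.
def RunInv (i c cp : Int) (rs : List Int) : Prop :=
  0 ≤ c ∧ rs.length = c.toNat + 1 ∧
  (c = 0 → cp = 0 ∧ rs = [i]) ∧
  (c = 1 → ∃ a, rs = [a, cp])

lemma main_inv : ∀ (xs : List Int) (st i c cp : Int) (rs : List Int), RunInv i c cp rs →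
    (auxA xs i (st, c, cp)).2.1 = ((xs.foldl stepB (rs, some st)).1.length : Int) - 1 ∧
    RunInv (i + xs.length) (auxA xs i (st, c, cp)).2.1 (auxA xs i (st, c, cp)).2.2
        (xs.foldl stepB (rs, some st)).1 ∧
    (xs.foldl stepB (rs, some st)).2 = some (auxA xs i (st, c, cp)).1 := by
  intro xs
  induction xs with
  | nil =>
      intro st i c cp rs hinv
      refine ⟨?_, by simpa using hinv, rfl⟩
      obtain ⟨hc, hlen, _, _⟩ := hinv
      simp [auxA, hlen]; omega
  | cons x xs ih =>
      intro st i c cp rs hinv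
      obtain ⟨hc, hlen, h0, h1⟩ := hinv
      have hrs : rs ≠ [] := by
        intro h; rw [h] at hlen; simp at hlen
      by_cases hx : x = st
      · -- same run: B increments the head of rs, A leaves (st, c, cp)
        subst hx
        obtain ⟨r0, rt⟩ := (List.exists_cons_of_ne_nil hrs)
        obtain ⟨rt', hrt⟩ := rt
        subst hrt
        have hstep : stepB (r0 :: rt', some x) x = ((r0 + 1) :: rt', some x) := by
          simp [stepB]
        have hinv' : RunInv (i + 1) c cp ((r0 + 1) :: rt') := by
          refine ⟨hc, by simpa using hlen, ?_, ?_⟩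
          · intro h; obtain ⟨hcp, hr⟩ := h0 h
            simp at hr
            exact ⟨hcp, by simp [hr.1, hr.2]⟩
          · intro h; obtain ⟨a, ha⟩ := h1 h
            simp at ha
            exact ⟨r0 + 1, by simp [ha.2]⟩
        have := ih x (i + 1) c cp ((r0 + 1) :: rt') hinv'
        simpa [auxA, List.foldl, hstep, add_assoc, add_comm, add_left_comm] using this
      · -- change: B pushes a new run, A records (x, c+1, i)
        have hstep : stepB (rs, some st) x = (1 :: rs, some x) := by
          simp [stepB, Ne.symm hx]
        have hinv' : RunInv (i + 1) (c + 1) i (1 :: rs) := by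
          refine ⟨by omega, by simp [hlen]; omega, by omega, ?_⟩
          intro h
          have hc0 : c = 0 := by omega
          obtain ⟨_, hr⟩ := h0 hc0
          exact ⟨1, by simp [hr]⟩
        have := ih x (i + 1) (c + 1) i (1 :: rs) hinv'
        simpa [auxA, hx, List.foldl, hstep, add_assoc, add_comm, add_left_comm] using this

-- ===== VERDICT (by name: the statement is the Claim_ definition above) =====
theorem changed_only_once_spec : Claim_equal_changed_only_once := by
  intro l _ hpre
  obtain ⟨h, t⟩ := List.exists_cons_of_ne_nil hpre
  obtain ⟨t', rfl⟩ := t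
  unfold Spec_changed_only_once changed_only_once changed_only_once_alt
  rw [foldB_eq]
  have hbridge := foldA_bridge (h :: t') t' 1 (h, 0, 0) (by simp)
  simp only [List.headD]
  push_cast at hbridge
  rw [hbridge]
  have hstep1 : stepB ([], none) h = ([1], some h) := by simp [stepB]
  have hfold : (h :: t').foldl stepB ([], none) = t'.foldl stepB ([1], some h) := by
    simp [List.foldl, hstep1]
  rw [hfold]
  have hinv0 : RunInv 1 0 0 [1] := by
    refine ⟨le_refl 0, by simp, fun _ => ⟨rfl, rfl⟩, by omega⟩
  have hmain := main_inv t' h 1 0 0 [1] hinv0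
  obtain ⟨hclen, hinv, _⟩ := hmain
  obtain ⟨hc0, hlen, h0, h1⟩ := hinv
  set r := auxA t' 1 (h, 0, 0) with hr
  set rsf := (t'.foldl stepB ([1], some h)).1 with hrsf
  by_cases hgt : r.2.1 > 1
  · -- more than one change: both return -1
    have : (rsf.length : Int) > 2 := by
      have : (rsf.length : Int) = r.2.1 + 1 := by omega
      omega
    simp only [hgt, if_pos]
    rw [if_pos (by simpa using this)]
  · simp only [hgt, ite_false]
    have hl2 : (rsf.length : Int) = r.2.1 + 1 := by omega
    rw [if_neg (by simp only [List.length_reverse]; omega)]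
    by_cases hc1 : r.2.1 = 1
    · obtain ⟨a, ha⟩ := h1 hc1
      rw [if_pos (by simp [ha])]
      simp [ha]
    · have hc00 : r.2.1 = 0 := by omega
      obtain ⟨hcp, hrs⟩ := h0 hc00
      rw [if_neg (by simp [hrs])]
      omega
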